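-- pv_equiv track=rewrite | github.com/alonso-08/problemas-HackerRank | flojo.py | palabra_corta
-- ===== SOURCE A (Python) =====
-- def palabra_corta(palabra):
--     resultado=[]
--     letra_inicial=None
--     letra_final=None
--     cantidad=len(palabra)-2
--     if(len(palabra)>4) and len(palabra)>=1 and len(palabra)<=100:
--         for index,letra in enumerate(palabra):
--
--             if (index==0):
--                 letra_inicial=letra
--                 resultado.append(letra_inicial)
--             elif index==len(palabra)-1:
--                 resultado.append(cantidad)
--                 letra_final=letra
--                 resultado.append(letra_final)
--
--             else:
--                 pass
--
--         resultado=''.join(map(str,resultado))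
--         return resultado
--     else:
--         return palabra
-- ===== SOURCE B (Python) =====
-- def palabra_corta(palabra):
--     if 4 < len(palabra) <= 100:
--         return palabra[0] + str(len(palabra) - 2) + palabra[-1]
--     return palabra
-- ===== Notes on version B (the rewrite author's own statement) =====
-- stated objective: simpler
-- what changed: Replaced the enumerate loop with accumulator list, sentinel Nones and join(map(str,...)) by a single closed-form expression first + str(len-2) + last guarded by the same length condition.
import Mathlib
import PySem

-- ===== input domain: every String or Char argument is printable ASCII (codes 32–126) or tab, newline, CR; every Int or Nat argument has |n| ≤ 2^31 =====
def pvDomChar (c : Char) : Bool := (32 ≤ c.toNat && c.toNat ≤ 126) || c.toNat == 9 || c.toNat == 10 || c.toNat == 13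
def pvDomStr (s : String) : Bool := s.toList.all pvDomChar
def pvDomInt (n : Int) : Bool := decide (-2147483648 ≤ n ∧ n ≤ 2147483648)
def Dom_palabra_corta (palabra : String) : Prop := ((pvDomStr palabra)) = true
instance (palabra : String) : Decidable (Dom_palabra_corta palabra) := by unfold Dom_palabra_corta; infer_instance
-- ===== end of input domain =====

-- B replaces A's enumerate loop + list accumulator + join(map(str,...)) by one closed-form
-- expression first + str(len-2) + last under the same length guard (objective: simpler).

-- ===== PORT A =====
-- resultado holds strings-to-be (a char contributes itself, cantidad contributes str(cantidad));
-- modelled as List (List Char), joined by ''.join = Chars.join [].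
def palabra_corta (palabra : String) : String :=
  let n : Nat := palabra.toList.length
  let cantidad : Int := (n : Int) - 2
  if n > 4 ∧ n ≥ 1 ∧ n ≤ 100 then
    let resultado : List (List Char) :=
      (PySem.List.enumerate palabra.toList 0).foldl (fun acc p =>
        if p.1 = 0 then acc ++ [[p.2]]
        else if p.1 = (n : Int) - 1 then (acc ++ [PySem.Int.toChars cantidad]) ++ [[p.2]]
        else acc) []
    String.ofList (PySem.Chars.join [] resultado)
  else palabra

-- ===== PORT B =====
def palabra_corta_alt (palabra : String) : String :=
  let cs := palabra.toList
  if 4 < cs.length ∧ cs.length ≤ 100 then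
    match cs.head?, cs.getLast? with
    | some a, some b => String.ofList ([a] ++ PySem.Int.toChars ((cs.length : Int) - 2) ++ [b])
    | _, _ => palabra
  else palabra

-- ===== PRECONDITION & SPEC =====
def Spec_palabra_corta (palabra : String) (out : String) : Prop := out = palabra_corta_alt palabra
instance (palabra : String) (out : String) : Decidable (Spec_palabra_corta palabra out) := by unfold Spec_palabra_corta; infer_instance

-- ===== CLAIM (what is proved, stated in full; the proofs are below) =====
def Claim_equal_palabra_corta : Prop := ∀ (palabra : String), Dom_palabra_corta palabra → Spec_palabra_corta palabra (palabra_corta palabra)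

-- ===== LEMMAS AND PROOFS =====

-- The middle of the loop (indices strictly between 0 and n-1) leaves the accumulator unchanged.
theorem pc_mid_skip (mid : List Char) (n : Nat) (s : Int) (acc : List (List Char))
    (hs : 0 < s) (hub : s + mid.length ≤ (n : Int) - 1) :
    (PySem.List.enumerate mid s).foldl (fun acc p =>
        if p.1 = 0 then acc ++ [[p.2]]
        else if p.1 = (n : Int) - 1 then (acc ++ [PySem.Int.toChars ((n : Int) - 2)]) ++ [[p.2]]
        else acc) acc = acc := by
  induction mid generalizing s acc with
  | nil => simp [PySem.List.enumerate_nil]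
  | cons c rest ih =>
      rw [PySem.List.enumerate_cons]
      simp only [List.foldl_cons]
      have h0 : s ≠ 0 := by omega
      have h1 : s ≠ (n : Int) - 1 := by
        simp only [List.length_cons] at hub; push_cast at hub; omega
      rw [if_neg h0, if_neg h1]
      apply ih
      · omega
      · simp only [List.length_cons] at hub; push_cast at hub ⊢; omega

-- The whole loop on a :: mid ++ [b] produces [[a], str(n-2), [b]].
theorem pc_fold (a b : Char) (mid : List Char) (n : Nat) (hn : n = mid.length + 2) :
    (PySem.List.enumerate (a :: mid ++ [b]) 0).foldl (fun acc p =>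
        if p.1 = 0 then acc ++ [[p.2]]
        else if p.1 = (n : Int) - 1 then (acc ++ [PySem.Int.toChars ((n : Int) - 2)]) ++ [[p.2]]
        else acc) [] = [[a], PySem.Int.toChars ((n : Int) - 2), [b]] := by
  have hsplit : (a :: mid ++ [b] : List Char) = a :: (mid ++ [b]) := rfl
  rw [hsplit, PySem.List.enumerate_cons, PySem.List.enumerate_append,
      PySem.List.enumerate_cons, PySem.List.enumerate_nil]
  simp only [List.foldl_cons, List.foldl_append, List.foldl_nil, List.nil_append,
    zero_add, if_true]
  have hidx : (1 : Int) + mid.length = (n : Int) - 1 := by push_cast [hn]; ring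
  rw [if_neg (show ¬((1 : Int) + (mid.length : Int) = 0) by omega), if_pos hidx]
  rw [pc_mid_skip mid n 1 [[a]] (by omega) (by omega)]
  simp

theorem palabra_corta_eq_alt (palabra : String) :
    palabra_corta palabra = palabra_corta_alt palabra := by
  simp only [palabra_corta, palabra_corta_alt]
  generalize palabra.toList = cs
  by_cases h : cs.length > 4 ∧ cs.length ≥ 1 ∧ cs.length ≤ 100
  · rw [if_pos h, if_pos ⟨h.1, h.2.2⟩]
    obtain ⟨hlen, -, -⟩ := h
    obtain ⟨a, rest, hrest⟩ : ∃ a rest, cs = a :: rest := by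
      cases cs with
      | nil => simp at hlen
      | cons a rest => exact ⟨a, rest, rfl⟩
    subst hrest
    have hrne : rest ≠ [] := by
      intro hr; rw [hr] at hlen; simp at hlen
    obtain ⟨mid, b, hmid⟩ : ∃ mid b, rest = mid ++ [b] :=
      ⟨rest.dropLast, rest.getLast hrne, (List.dropLast_append_getLast hrne).symm⟩
    subst hmid
    have hn : (a :: (mid ++ [b]) : List Char).length = mid.length + 2 := by simp
    simp only [hn]
    rw [show (a :: (mid ++ [b]) : List Char) = a :: mid ++ [b] from rfl,
        pc_fold a b mid (mid.length + 2) rfl]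
    have hl : (a :: (mid ++ [b]) : List Char).getLast? = some b := by
      rw [show (a :: (mid ++ [b]) : List Char) = (a :: mid) ++ [b] from by simp]
      exact List.getLast?_concat
    simp [hl, PySem.Chars.join_cons_cons, PySem.Chars.join_singleton]
  · rw [if_neg h, if_neg (by omega)]

-- ===== VERDICT (by name: the statement is the Claim_ definition above) =====
theorem palabra_corta_spec : Claim_equal_palabra_corta := by
  intro palabra _
  unfold Spec_palabra_corta
  exact palabra_corta_eq_alt palabra
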